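-- pv_equiv track=rewrite | github.com/Akshatt/problems-vs-algorithms-udacity | problem3.py | rearrange_digits
-- ===== SOURCE A (Python) =====
-- def rearrange_digits(input_list):
--     def merge(array):
--         if len(array) > 1:
--             mid = len(array) // 2
--             left = array[:mid]
--             right = array[mid:]
--
--             merge(left)
--             merge(right)
--
--             i,j = 0,0
--             m = 0
--
--             while i < len(left) and j < len(right):
--                 if left[i] < right[j]:
--                     array[m] = right[j]
--                     j += 1
--                 else:
--                     array[m] = left[i]
--                     i += 1
--                 m += 1
--
--             while i < len(left):
--                 array[m] = left[i]
--                 i += 1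
--                 m += 1
--
--             while j < len(right):
--                 array[m] = right[j]
--                 j += 1
--                 m += 1
--
--         return array
--
--     x,y = 0,0
--     sorted_input_list = merge(input_list)
--     for i in range(len(sorted_input_list)):
--         if i %2 == 0:
--             x = x*10 + sorted_input_list[i]
--         else:
--             y = y*10 + sorted_input_list[i]
--     return x,y
-- ===== SOURCE B (Python) =====
-- def rearrange_digits(input_list):
--     # Selection-based: repeatedly extract the current maximum and feed it
--     # alternately into x and y; no sorted list is ever built.
--     # Unlike A, this does NOT sort the caller's list in place (return value only).
--     remaining = list(input_list)
--     x, y = 0, 0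
--     take_x = True
--     while remaining:
--         m = max(remaining)
--         remaining.remove(m)
--         if take_x:
--             x = x * 10 + m
--         else:
--             y = y * 10 + m
--         take_x = not take_x
--     return x, y
-- ===== Notes on version B (the rewrite author's own statement) =====
-- stated objective: alternative
-- what changed: Replaces A's sort-then-alternate scheme (recursive merge sort into a sorted list, then an index-parity loop over it) by selection: repeatedly extract the current maximum from the remaining elements and feed it alternately straight into x and y, never materialising a sorted list; unlike A, B does not sort the caller's list in place (return value only).
import Mathlib
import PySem

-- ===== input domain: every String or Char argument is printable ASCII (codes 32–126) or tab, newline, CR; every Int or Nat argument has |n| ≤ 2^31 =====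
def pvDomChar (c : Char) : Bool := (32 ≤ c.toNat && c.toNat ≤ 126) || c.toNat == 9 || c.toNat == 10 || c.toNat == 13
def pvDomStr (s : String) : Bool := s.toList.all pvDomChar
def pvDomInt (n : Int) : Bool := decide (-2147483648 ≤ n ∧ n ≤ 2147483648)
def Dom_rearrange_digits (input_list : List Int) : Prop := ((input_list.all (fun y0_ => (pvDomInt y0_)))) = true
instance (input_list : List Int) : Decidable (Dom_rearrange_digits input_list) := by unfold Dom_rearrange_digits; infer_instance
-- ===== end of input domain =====

-- B replaces A's merge-sort-then-alternate by selection: repeatedly extract the current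
-- maximum and feed it alternately straight into x and y (objective: alternative).
-- A sorts the caller's list in place, B does not; the equivalence proved is about the RETURN value.

-- ===== PORT A =====
-- A's three while-loops that merge two (descending) runs into the array, step for step:
-- while both nonempty take right when left[i] < right[j] else left; then copy the remainder.
def mergeTwoA : List Int → List Int → List Int
  | [], r => r
  | l, [] => l
  | a :: l, b :: r => if a < b then b :: mergeTwoA (a :: l) r else a :: mergeTwoA l (b :: r)
termination_by l r => l.length + r.length

-- A's recursive `merge`: mid = len(array)//2 (len ≥ 0, so Python's // is Nat division);
-- array[:mid] / array[mid:] are take/drop (exact: 0 ≤ mid ≤ len).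
def mergeSortA (array : List Int) : List Int :=
  if _h : 1 < array.length then
    mergeTwoA (mergeSortA (array.take (array.length / 2)))
              (mergeSortA (array.drop (array.length / 2)))
  else array
termination_by array.length
decreasing_by
  · simp [List.length_take]; omega
  · simp [List.length_drop]; omega

def rearrange_digits (input_list : List Int) : Int × Int :=
  let sorted_input_list := mergeSortA input_list
  -- for i in range(len(sorted_input_list)): if i % 2 == 0: x = x*10 + s[i] else: y = y*10 + s[i]
  (PySem.List.pyRange 0 (PySem.List.len sorted_input_list) 1).foldl
    (fun p i =>
      if PySem.Int.mod i 2 == 0 then (p.1 * 10 + PySem.List.pyGetD sorted_input_list i 0, p.2)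
      else (p.1, p.2 * 10 + PySem.List.pyGetD sorted_input_list i 0)) (0, 0)

-- ===== PORT B =====
-- B's while loop: while remaining: m = max(remaining); remaining.remove(m); alternate into x/y.
-- max(list) = PySem.List.max? (none iff the list is empty = loop exit);
-- list.remove(m) = PySem.List.remove? (m is the max, hence present, so it is `some`).
def selLoop (remaining : List Int) (x y : Int) (take_x : Bool) : Int × Int :=
  match hm : PySem.List.max? remaining (fun v => v) with
  | none => (x, y)
  | some m =>
    let rest := (PySem.List.remove? remaining m).getD []
    if take_x then selLoop rest (x * 10 + m) y false
    else selLoop rest x (y * 10 + m) true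
termination_by remaining.length
decreasing_by
  all_goals
    have hmem : m ∈ remaining := PySem.List.max?_mem hm
    rw [PySem.List.remove?_eq_some_erase remaining m hmem, Option.getD_some]
    have := List.length_erase_of_mem hmem
    have hpos : 0 < remaining.length := List.length_pos_of_mem hmem
    omega

def rearrange_digits_alt (input_list : List Int) : Int × Int :=
  selLoop input_list 0 0 true

-- ===== PRECONDITION & SPEC =====
def Spec_rearrange_digits (input_list : List Int) (out : Int × Int) : Prop := out = rearrange_digits_alt input_list
instance (input_list : List Int) (out : Int × Int) : Decidable (Spec_rearrange_digits input_list out) := by unfold Spec_rearrange_digits; infer_instance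

-- ===== CLAIM (what is proved, stated in full; the proofs are below) =====
def Claim_equal_rearrange_digits : Prop := ∀ (input_list : List Int), Dom_rearrange_digits input_list → Spec_rearrange_digits input_list (rearrange_digits input_list)

-- ===== LEMMAS AND PROOFS =====

theorem mergeTwoA_perm : ∀ (l r : List Int), (mergeTwoA l r).Perm (l ++ r)
  | [], r => by simp [mergeTwoA]
  | a :: l, [] => by simp [mergeTwoA]
  | a :: l, b :: r => by
    rw [mergeTwoA]
    split
    · exact ((mergeTwoA_perm (a :: l) r).cons b).trans List.perm_middle.symm
    · exact (mergeTwoA_perm l (b :: r)).cons a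
termination_by l r => l.length + r.length

theorem mergeTwoA_pairwise : ∀ (l r : List Int),
    l.Pairwise (fun a b => b ≤ a) → r.Pairwise (fun a b => b ≤ a) →
    (mergeTwoA l r).Pairwise (fun a b => b ≤ a)
  | [], r, _, hr => by simpa [mergeTwoA] using hr
  | a :: l, [], hl, _ => by simpa [mergeTwoA] using hl
  | a :: l, b :: r, hl, hr => by
    rw [mergeTwoA]
    have hla := (List.pairwise_cons.mp hl).1
    have hl' := (List.pairwise_cons.mp hl).2
    have hrb := (List.pairwise_cons.mp hr).1
    have hr' := (List.pairwise_cons.mp hr).2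
    split
    · rename_i hab
      refine List.pairwise_cons.mpr ⟨?_, mergeTwoA_pairwise (a :: l) r hl hr'⟩
      intro x hx
      have := (mergeTwoA_perm (a :: l) r).mem_iff.mp hx
      rcases List.mem_append.mp this with h | h
      · rcases List.mem_cons.mp h with h | h
        · omega
        · have := hla x h; omega
      · exact hrb x h
    · rename_i hab
      refine List.pairwise_cons.mpr ⟨?_, mergeTwoA_pairwise l (b :: r) hl' hr⟩
      intro x hx
      have := (mergeTwoA_perm l (b :: r)).mem_iff.mp hx
      rcases List.mem_append.mp this with h | h
      · exact hla x h
      · rcases List.mem_cons.mp h with h | h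
        · omega
        · have := hrb x h; omega
termination_by l r => l.length + r.length

theorem mergeSortA_perm (xs : List Int) : (mergeSortA xs).Perm xs := by
  rw [mergeSortA]
  split
  · exact (mergeTwoA_perm _ _).trans
      (((mergeSortA_perm _).append (mergeSortA_perm _)).trans
        (by rw [List.take_append_drop]))
  · exact List.Perm.refl xs
termination_by xs.length
decreasing_by
  · simp [List.length_take]; omega
  · simp [List.length_drop]; omega

theorem mergeSortA_pairwise (xs : List Int) : (mergeSortA xs).Pairwise (fun a b => b ≤ a) := by
  rw [mergeSortA]
  split
  · exact mergeTwoA_pairwise _ _ (mergeSortA_pairwise _) (mergeSortA_pairwise _)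
  · rename_i h
    match xs, h with
    | [], _ => exact List.Pairwise.nil
    | [a], _ => simp
    | a :: b :: t, h => exact absurd (by simp) h
termination_by xs.length
decreasing_by
  · simp [List.length_take]; omega
  · simp [List.length_drop]; omega

-- extracting the maximum strictly shortens the list (termination of the proof-only helpers)
theorem erase_max_lt {l : List Int} {m : Int}
    (hm : PySem.List.max? l (fun v => v) = some m) : (l.erase m).length < l.length := by
  have hmem : m ∈ l := PySem.List.max?_mem hm
  have := List.length_erase_of_mem hmem
  have hpos : 0 < l.length := List.length_pos_of_mem hmem
  omega

-- proof-only mirror of B's extraction order: the list of extracted maxima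
def selSort (l : List Int) : List Int :=
  match _hm : PySem.List.max? l (fun v => v) with
  | none => []
  | some m => m :: selSort (l.erase m)
termination_by l.length
decreasing_by
  exact erase_max_lt (by assumption)

theorem selSort_perm (l : List Int) : (selSort l).Perm l := by
  rw [selSort]
  split
  · rename_i hm
    rw [(PySem.List.max?_eq_none_iff l (fun v => v)).mp hm]
  · rename_i m hm
    have hmem : m ∈ l := PySem.List.max?_mem hm
    exact ((selSort_perm (l.erase m)).cons m).trans (List.perm_cons_erase hmem).symm
termination_by l.length
decreasing_by
  exact erase_max_lt (by assumption)

theorem selSort_pairwise (l : List Int) : (selSort l).Pairwise (fun a b => b ≤ a) := by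
  rw [selSort]
  split
  · exact List.Pairwise.nil
  · rename_i m hm
    refine List.pairwise_cons.mpr ⟨?_, selSort_pairwise (l.erase m)⟩
    intro x hx
    have hx' : x ∈ l.erase m := (selSort_perm (l.erase m)).mem_iff.mp hx
    exact PySem.List.max?_isMax hm x (List.mem_of_mem_erase hx')
termination_by l.length
decreasing_by
  exact erase_max_lt (by assumption)

theorem selSort_eq_mergeSortA (l : List Int) : selSort l = mergeSortA l := by
  have hperm : (selSort l).Perm (mergeSortA l) :=
    (selSort_perm l).trans (mergeSortA_perm l).symm
  exact List.Perm.eq_of_pairwise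
    (fun a b _ _ h1 h2 => le_antisymm h2 h1)
    (selSort_pairwise l) (mergeSortA_pairwise l) hperm

-- the body of A's loop, with the index already a Nat
def gIdx (s : List Int) (p : Int × Int) (k : Nat) : Int × Int :=
  if k % 2 == 0 then (p.1 * 10 + s.getD k 0, p.2) else (p.1, p.2 * 10 + s.getD k 0)

-- the alternating accumulator: take the head into x, recurse with the roles swapped
def altAcc : List Int → Int → Int → Int × Int
  | [], x, y => (x, y)
  | d :: rest, x, y => (altAcc rest y (x * 10 + d)).swap

theorem gIdx_shift (d : Int) (rest : List Int) :
    ∀ (l : List Nat) (p : Int × Int),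
      l.foldl (fun p k => gIdx (d :: rest) p (k + 1)) p
        = (l.foldl (gIdx rest) (p.2, p.1)).swap
  | [], p => rfl
  | k :: l, p => by
    have hstep : gIdx (d :: rest) p (k + 1) = ((gIdx rest (p.2, p.1) k).swap) := by
      unfold gIdx
      rcases Nat.even_or_odd k with h | h
      · have h2 : k % 2 = 0 := Nat.even_iff.mp h
        simp [h2, Nat.add_mod, Prod.swap]
      · have h2 : k % 2 = 1 := Nat.odd_iff.mp h
        simp [h2, Nat.add_mod, Prod.swap]
    rw [List.foldl_cons, List.foldl_cons, hstep, gIdx_shift d rest l]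
    simp

theorem foldRange_eq_altAcc : ∀ (s : List Int) (x y : Int),
    (List.range s.length).foldl (gIdx s) (x, y) = altAcc s x y
  | [], x, y => rfl
  | d :: rest, x, y => by
    rw [List.length_cons, List.range_succ_eq_map, List.foldl_cons, List.foldl_map]
    have h0 : gIdx (d :: rest) (x, y) 0 = (x * 10 + d, y) := by simp [gIdx]
    rw [h0, gIdx_shift d rest, foldRange_eq_altAcc rest]
    rfl

-- A's pyRange/pyGetD loop is the Nat-indexed fold gIdx
theorem loopA_eq (s : List Int) :
    (PySem.List.pyRange 0 (PySem.List.len s) 1).foldl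
      (fun p i =>
        if PySem.Int.mod i 2 == 0 then (p.1 * 10 + PySem.List.pyGetD s i 0, p.2)
        else (p.1, p.2 * 10 + PySem.List.pyGetD s i 0)) ((0 : Int), (0 : Int))
      = (List.range s.length).foldl (gIdx s) (0, 0) := by
  rw [PySem.List.len_eq, PySem.List.pyRange_one, List.foldl_map]
  have hb : ((s.length : Int) - 0).toNat = s.length := by omega
  rw [hb]
  congr 1
  funext p k
  have hm : PySem.Int.mod (0 + (k : Int)) 2 = ((k % 2 : Nat) : Int) := by
    rw [zero_add]
    exact_mod_cast PySem.Int.mod_natCast k 2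
  have hg : PySem.List.pyGetD s (0 + (k : Int)) 0 = s.getD k 0 := by
    rw [zero_add]; simp
  rw [hm, hg]
  unfold gIdx
  rcases Nat.even_or_odd k with h | h
  · have h2 : k % 2 = 0 := Nat.even_iff.mp h
    simp [h2]
  · have h2 : k % 2 = 1 := Nat.odd_iff.mp h
    simp [h2]

-- B's selection loop computes the alternating accumulator over its extraction order
theorem selLoop_eq (l : List Int) : ∀ (x y : Int) (b : Bool),
    selLoop l x y b = if b then altAcc (selSort l) x y else (altAcc (selSort l) y x).swap := by
  intro x y b
  rw [selLoop, selSort]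
  split
  · cases b <;> simp [altAcc, Prod.swap]
  · rename_i m hm
    have hmem : m ∈ l := PySem.List.max?_mem hm
    have hrest : (PySem.List.remove? l m).getD [] = l.erase m := by
      rw [PySem.List.remove?_eq_some_erase l m hmem]; rfl
    cases b <;> simp [hrest, selLoop_eq (l.erase m), altAcc]
termination_by l.length
decreasing_by
  all_goals exact erase_max_lt (by assumption)

-- ===== VERDICT (by name: the statement is the Claim_ definition above) =====
theorem rearrange_digits_spec : Claim_equal_rearrange_digits := by
  intro input_list _
  unfold Spec_rearrange_digits rearrange_digits rearrange_digits_alt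
  rw [loopA_eq, foldRange_eq_altAcc, selLoop_eq, if_pos rfl, selSort_eq_mergeSortA]
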